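-- pv_equiv track=rewrite | github.com/Integrum-Global/new_project_template | apps/qa_agentic_testing/core/report_generator.py | _prepare_results_chart
-- ===== SOURCE A (Python) =====
-- from typing import Any, Dict, List, Optional, Union
--
-- def _prepare_results_chart(results: List[Dict[str, Any]]) -> Dict[str, Any]:
--     """Prepare test results for visualization."""
--     if not results:
--         return {"passed": 0, "failed": 0, "skipped": 0, "total": 0}
--
--     passed = sum(1 for r in results if r.get("status") == "passed")
--     failed = sum(1 for r in results if r.get("status") == "failed")
--     skipped = sum(1 for r in results if r.get("status") == "skipped")
--
--     return {
--         "passed": passed,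
--         "failed": failed,
--         "skipped": skipped,
--         "total": len(results),
--     }
-- ===== SOURCE B (Python) =====
-- def _prepare_results_chart(results):
--     """Single pass: tally statuses into one dict, then read the three keys."""
--     counts = {}
--     for r in results:
--         s = r.get("status")
--         counts[s] = counts.get(s, 0) + 1
--     return {
--         "passed": counts.get("passed", 0),
--         "failed": counts.get("failed", 0),
--         "skipped": counts.get("skipped", 0),
--         "total": len(results),
--     }
-- ===== Notes on version B (the rewrite author's own statement) =====
-- stated objective: simpler
-- what changed: Replaces three separate generator scans (one per status) and the redundant empty-results guard with a single pass that tallies statuses into one dict, then reads the three keys with .get(...,0).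
import Mathlib
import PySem

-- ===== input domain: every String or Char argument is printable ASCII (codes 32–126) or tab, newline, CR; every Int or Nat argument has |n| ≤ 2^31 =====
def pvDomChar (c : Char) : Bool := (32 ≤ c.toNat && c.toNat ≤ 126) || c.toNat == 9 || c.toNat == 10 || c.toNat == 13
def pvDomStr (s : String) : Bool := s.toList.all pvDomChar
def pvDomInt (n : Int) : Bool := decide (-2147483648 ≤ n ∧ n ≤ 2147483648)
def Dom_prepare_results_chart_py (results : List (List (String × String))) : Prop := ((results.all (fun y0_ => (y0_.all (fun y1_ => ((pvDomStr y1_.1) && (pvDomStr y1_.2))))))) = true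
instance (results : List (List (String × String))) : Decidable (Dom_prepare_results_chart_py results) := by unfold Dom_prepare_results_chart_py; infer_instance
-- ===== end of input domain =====

-- B replaces A's three per-status scans (and its redundant empty guard) by one tallying pass over results; objective: simpler.


-- ===== PORT A =====
-- r.get("status"): the Python dict is rebuilt from the assoc list (duplicate keys: last wins), then .get
def pvStatus (r : List (String × String)) : Option String :=
  (PySem.Dict.ofList r).get? "status"

def prepare_results_chart_py (results : List (List (String × String))) : List (String × Int) :=
  if results = [] then [("passed", 0), ("failed", 0), ("skipped", 0), ("total", 0)]
  else
    let passed : Int := (results.filter (fun r => pvStatus r == some "passed")).length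
    let failed : Int := (results.filter (fun r => pvStatus r == some "failed")).length
    let skipped : Int := (results.filter (fun r => pvStatus r == some "skipped")).length
    [("passed", passed), ("failed", failed), ("skipped", skipped), ("total", (results.length : Int))]

-- ===== PORT B =====
def prepare_results_chart_py_alt (results : List (List (String × String))) : List (String × Int) :=
  let counts : PySem.Dict (Option String) Int :=
    results.foldl (fun d r =>
      let s := pvStatus r
      d.insert s (d.getD s 0 + 1)) PySem.Dict.empty
  [("passed", counts.getD (some "passed") 0),
   ("failed", counts.getD (some "failed") 0),
   ("skipped", counts.getD (some "skipped") 0),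
   ("total", (results.length : Int))]

-- ===== PRECONDITION & SPEC =====
def Spec_prepare_results_chart_py (results : List (List (String × String))) (out : List (String × Int)) : Prop := out = prepare_results_chart_py_alt results
instance (results : List (List (String × String))) (out : List (String × Int)) : Decidable (Spec_prepare_results_chart_py results out) := by unfold Spec_prepare_results_chart_py; infer_instance

-- ===== CLAIM (what is proved, stated in full; the proofs are below) =====
def Claim_equal_prepare_results_chart_py : Prop := ∀ (results : List (List (String × String))), Dom_prepare_results_chart_py results → Spec_prepare_results_chart_py results (prepare_results_chart_py results)

-- ===== LEMMAS AND PROOFS =====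

-- B's tally read at a status v equals the number of results whose status is v.
theorem pv_counts_getD (results : List (List (String × String))) (v : Option String) :
    (results.foldl (fun d r =>
        let s := pvStatus r
        d.insert s (d.getD s 0 + 1)) (PySem.Dict.empty : PySem.Dict (Option String) Int)).getD v 0
      = ((results.filter (fun r => pvStatus r == v)).length : Int) := by
  have h : (results.foldl (fun d r =>
        let s := pvStatus r
        d.insert s (d.getD s 0 + 1)) (PySem.Dict.empty : PySem.Dict (Option String) Int))
      = (results.map pvStatus).foldl (fun d x => d.insert x (d.getD x 0 + 1)) PySem.Dict.empty := by
    simp [List.foldl_map]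
  rw [h, PySem.Dict.foldl_insert_getD_add_one_eq_counter, PySem.Dict.getD_counter,
    List.count_eq_countP, List.countP_map]
  simp [List.countP_eq_length_filter, Function.comp_def]

-- ===== VERDICT (by name: the statement is the Claim_ definition above) =====
theorem prepare_results_chart_py_spec : Claim_equal_prepare_results_chart_py := by
  intro results _
  unfold Spec_prepare_results_chart_py prepare_results_chart_py prepare_results_chart_py_alt
  rcases results with _ | ⟨r, rs⟩
  · simp
  · simp only [if_neg (by simp : ¬(r :: rs = []))]
    rw [pv_counts_getD, pv_counts_getD, pv_counts_getD]
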